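-- pv_equiv track=rewrite | github.com/cbg-ethz/smallgenomeutilities | smallgenomeutilities/__mapper_impl__.py | convert_from_list_to_intervals
-- ===== SOURCE A (Python) =====
-- from collections import namedtuple
--
-- gRange = namedtuple("gRange", "start stop")
--
-- def convert_from_list_to_intervals(loci):
--     valid_loci = sorted(set(loci))
--
--     # add sentinel
--     valid_loci.append(max(valid_loci) + 2)
--
--     start_locus = valid_loci[0]
--
--     result = []
--
--     for i in range(1, len(valid_loci)):
--         if valid_loci[i] > valid_loci[i - 1] + 1:
--             # discontinuity, got one range
--             result.append(gRange(start=start_locus,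
--                                  stop=valid_loci[i - 1] + 1))
--             start_locus = valid_loci[i]
--
--     return result
-- ===== SOURCE B (Python) =====
-- from collections import namedtuple
--
-- gRange = namedtuple("gRange", "start stop")
--
-- def convert_from_list_to_intervals(loci):
--     present = set(loci)
--     starts = sorted(x for x in present if x - 1 not in present)
--     stops = sorted(x for x in present if x + 1 not in present)
--     return [gRange(start=a, stop=b + 1) for a, b in zip(starts, stops)]
-- ===== Notes on version B (the rewrite author's own statement) =====
-- stated objective: alternative
-- what changed: B finds run boundaries by set-membership tests (x-1 not in the set marks a run start, x+1 not in the set marks a run end) and zips the sorted starts with the sorted ends, instead of A's sentinel-append plus adjacent-index look-back scan.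
import Mathlib
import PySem

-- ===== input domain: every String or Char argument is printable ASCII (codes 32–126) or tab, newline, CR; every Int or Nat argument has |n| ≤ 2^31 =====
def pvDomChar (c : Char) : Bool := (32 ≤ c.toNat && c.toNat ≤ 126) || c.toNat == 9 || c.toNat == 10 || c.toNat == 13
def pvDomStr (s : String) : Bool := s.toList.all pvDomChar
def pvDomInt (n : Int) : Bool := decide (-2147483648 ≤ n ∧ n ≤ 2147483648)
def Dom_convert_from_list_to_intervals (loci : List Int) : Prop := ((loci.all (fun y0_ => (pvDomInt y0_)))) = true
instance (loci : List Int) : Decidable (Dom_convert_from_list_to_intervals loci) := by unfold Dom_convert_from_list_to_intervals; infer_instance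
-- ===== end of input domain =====

-- B finds run boundaries by set-membership tests (x-1 / x+1 in the set) and zips sorted starts with stops,
-- instead of A's sentinel + adjacent-index scan; objective: alternative (similar cost).

-- ===== PORT A =====
def convert_from_list_to_intervals (loci : List Int) : List (Int × Int) :=
  let valid0 := PySem.List.sorted (PySem.Set.ofList loci) (fun x => x) false
  -- max(valid_loci) raises ValueError on an empty list; Pre_ excludes loci = []
  let valid := valid0 ++ [(PySem.List.max? valid0 (fun x => x)).getD 0 + 2]
  let start0 := PySem.List.pyGetD valid 0 0
  ((PySem.List.pyRange 1 (valid.length : Int) 1).foldl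
    (fun (st : Int × List (Int × Int)) i =>
      if PySem.List.pyGetD valid i 0 > PySem.List.pyGetD valid (i - 1) 0 + 1 then
        (PySem.List.pyGetD valid i 0, st.2 ++ [(st.1, PySem.List.pyGetD valid (i - 1) 0 + 1)])
      else st)
    (start0, [])).2

-- ===== PORT B =====
def convert_from_list_to_intervals_alt (loci : List Int) : List (Int × Int) :=
  let present := PySem.Set.ofList loci
  let starts := PySem.List.sorted
    (present.filter (fun x => !(PySem.Set.contains present (x - 1)))) (fun x => x) false
  let stops := PySem.List.sorted
    (present.filter (fun x => !(PySem.Set.contains present (x + 1)))) (fun x => x) false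
  (starts.zip stops).map (fun p => (p.1, p.2 + 1))

-- ===== PRECONDITION & SPEC =====
-- Pre_ excludes only the empty list, on which Python A raises ValueError (max of an empty sequence).
def Pre_convert_from_list_to_intervals (loci : List Int) : Prop := loci ≠ []
instance (loci : List Int) : Decidable (Pre_convert_from_list_to_intervals loci) := by unfold Pre_convert_from_list_to_intervals; infer_instance
def pvWitness_convert_from_list_to_intervals : List Int := [5, 1, 2, 2, 7]

def Spec_convert_from_list_to_intervals (loci : List Int) (out : List (Int × Int)) : Prop := out = convert_from_list_to_intervals_alt loci
instance (loci : List Int) (out : List (Int × Int)) : Decidable (Spec_convert_from_list_to_intervals loci out) := by unfold Spec_convert_from_list_to_intervals; infer_instance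

-- ===== CLAIM (what is proved, stated in full; the proofs are below) =====
def Claim_equal_convert_from_list_to_intervals : Prop := ∀ (loci : List Int), Dom_convert_from_list_to_intervals loci → Pre_convert_from_list_to_intervals loci → Spec_convert_from_list_to_intervals loci (convert_from_list_to_intervals loci)

-- ===== LEMMAS AND PROOFS =====

-- A's loop, as a structural recursion over the elements (prev = valid[i-1]).
def gLoop (prev : Int) (xs : List Int) (st : Int × List (Int × Int)) : Int × List (Int × Int) :=
  match xs with
  | [] => st
  | x :: rest =>
      gLoop x rest (if x > prev + 1 then (x, st.2 ++ [(st.1, prev + 1)]) else st)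

-- canonical run decomposition of a strictly increasing list
def runs (start last : Int) (vs : List Int) : List (Int × Int) :=
  match vs with
  | [] => [(start, last + 1)]
  | x :: xs => if x = last + 1 then runs start x xs else (start, last + 1) :: runs x x xs

-- run starts after the head / run ends
def sts (last : Int) : List Int → List Int
  | [] => []
  | x :: xs => if x = last + 1 then sts x xs else x :: sts x xs

def ens (last : Int) : List Int → List Int
  | [] => [last]
  | x :: xs => if x = last + 1 then ens x xs else last :: ens x xs

lemma fold_eq_gLoop (xs : List Int) :
    ∀ (k j : Nat) (st : Int × List (Int × Int)), 0 < j → j + k = xs.length →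
    (PySem.List.pyRange (j : Int) ((xs.length : Nat) : Int) 1).foldl
      (fun (st : Int × List (Int × Int)) i =>
        if PySem.List.pyGetD xs i 0 > PySem.List.pyGetD xs (i - 1) 0 + 1 then
          (PySem.List.pyGetD xs i 0, st.2 ++ [(st.1, PySem.List.pyGetD xs (i - 1) 0 + 1)])
        else st) st
    = gLoop (xs.getD (j - 1) 0) (xs.drop j) st := by
  intro k
  induction k with
  | zero =>
      intro j st hj hlen
      rw [PySem.List.pyRange_one_eq_nil (by omega : ((xs.length : Nat) : Int) ≤ (j : Int))]
      rw [List.drop_eq_nil_of_le (by omega : xs.length ≤ j)]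
      simp [gLoop]
  | succ k ih =>
      intro j st hj hlen
      have hjlt : j < xs.length := by omega
      rw [PySem.List.pyRange_one_cons (by exact_mod_cast hjlt)]
      simp only [List.foldl_cons]
      rw [(by push_cast; ring : (j : Int) + 1 = ((j + 1 : Nat) : Int)),
          ih (j + 1) _ (by omega) (by omega)]
      rw [List.drop_eq_getElem_cons hjlt]
      have e1 : PySem.List.pyGetD xs (j : Int) 0 = xs[j] := by
        rw [PySem.List.pyGetD_natCast]; exact List.getD_eq_getElem xs 0 hjlt
      have e2 : PySem.List.pyGetD xs ((j : Int) - 1) 0 = xs.getD (j - 1) 0 := by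
        rw [(by omega : (j : Int) - 1 = ((j - 1 : Nat) : Int)), PySem.List.pyGetD_natCast]
      have e3 : xs.getD (j + 1 - 1) 0 = xs[j] := by
        simp only [Nat.add_sub_cancel]; exact List.getD_eq_getElem xs 0 hjlt
      rw [e1, e2, e3]
      rfl

lemma fold_eq_gLoop_one (xs : List Int) (hne : xs ≠ []) (st : Int × List (Int × Int)) :
    (PySem.List.pyRange 1 ((xs.length : Nat) : Int) 1).foldl
      (fun (st : Int × List (Int × Int)) i =>
        if PySem.List.pyGetD xs i 0 > PySem.List.pyGetD xs (i - 1) 0 + 1 then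
          (PySem.List.pyGetD xs i 0, st.2 ++ [(st.1, PySem.List.pyGetD xs (i - 1) 0 + 1)])
        else st) st
    = gLoop (xs.getD 0 0) (xs.drop 1) st := by
  have hlen : 0 < xs.length := List.length_pos_iff.mpr hne
  have h := fold_eq_gLoop xs (xs.length - 1) 1 st (by omega) (by omega)
  simpa only [Nat.cast_one, Nat.sub_self] using h

lemma gLoop_runs : ∀ (vs : List Int) (last start s : Int) (acc : List (Int × Int)),
    (last :: vs).Pairwise (· < ·) → (∀ y ∈ last :: vs, y + 1 < s) →
    (gLoop last (vs ++ [s]) (start, acc)).2 = acc ++ runs start last vs := by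
  intro vs
  induction vs with
  | nil =>
      intro last start s acc hp hs
      have h1 : s > last + 1 := by have := hs last (by simp); omega
      simp [gLoop, runs, h1]
  | cons x xs ih =>
      intro last start s acc hp hs
      have hlt : last < x := (List.pairwise_cons.mp hp).1 x (by simp)
      have hp' : (x :: xs).Pairwise (· < ·) := (List.pairwise_cons.mp hp).2
      have hs' : ∀ y ∈ x :: xs, y + 1 < s := fun y hy => hs y (List.mem_cons_of_mem last hy)
      by_cases h : x = last + 1
      · have : ¬ (x > last + 1) := by omega
        simp only [List.cons_append, gLoop, if_neg this]
        rw [ih x start s acc hp' hs']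
        simp [runs, h]
      · have hgt : x > last + 1 := by omega
        simp only [List.cons_append, gLoop, if_pos hgt]
        rw [ih x x s (acc ++ [(start, last + 1)]) hp' hs']
        simp [runs, h]

lemma mem_pred_iff (pre : List Int) (last x : Int) (xs : List Int)
    (hp : (pre ++ last :: x :: xs).Pairwise (· < ·)) :
    (x - 1) ∈ (pre ++ last :: x :: xs) ↔ last = x - 1 := by
  rcases List.pairwise_append.mp hp with ⟨hpre, hrest, hcross⟩
  rcases List.pairwise_cons.mp hrest with ⟨hlast, hxxs⟩
  rcases List.pairwise_cons.mp hxxs with ⟨hx, _⟩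
  have hlx : last < x := hlast x (by simp)
  constructor
  · intro hmem
    rcases List.mem_append.mp hmem with hm | hm
    · have := hcross _ hm last (by simp); omega
    · rcases List.mem_cons.mp hm with h1 | h1
      · omega
      · rcases List.mem_cons.mp h1 with h2 | h2
        · omega
        · have := hx _ h2; omega
  · intro h
    rw [← h]
    simp

lemma mem_succ_iff (pre : List Int) (last : Int) (vs : List Int)
    (hp : (pre ++ last :: vs).Pairwise (· < ·)) :
    (last + 1) ∈ (pre ++ last :: vs) ↔ vs.head? = some (last + 1) := by
  rcases List.pairwise_append.mp hp with ⟨hpre, hrest, hcross⟩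
  rcases List.pairwise_cons.mp hrest with ⟨hlast, hvs⟩
  cases vs with
  | nil =>
      simp only [List.head?_nil]
      constructor
      · intro hmem
        rcases List.mem_append.mp hmem with hm | hm
        · have := hcross _ hm last (by simp); omega
        · rcases List.mem_cons.mp hm with h1 | h1
          · omega
          · simp at h1
      · intro h; simp at h
  | cons v tl =>
      rcases List.pairwise_cons.mp hvs with ⟨hv, _⟩
      have hlv : last < v := hlast v (by simp)
      simp only [List.head?_cons, Option.some.injEq]
      constructor
      · intro hmem
        rcases List.mem_append.mp hmem with hm | hm
        · have := hcross _ hm last (by simp); omega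
        · rcases List.mem_cons.mp hm with h1 | h1
          · omega
          · rcases List.mem_cons.mp h1 with h2 | h2
            · omega
            · have h3 := hv _ h2
              have h4 := hlast _ (List.mem_cons_of_mem v h2)
              omega
      · intro h
        rw [← h]
        simp

lemma filter_sts (w : List Int) (hw : w.Pairwise (· < ·)) :
    ∀ (vs pre : List Int) (last : Int), w = pre ++ last :: vs →
    vs.filter (fun x => !(w.contains (x - 1))) = sts last vs := by
  intro vs
  induction vs with
  | nil => intro pre last _; simp [sts]
  | cons x xs ih =>
      intro pre last hww
      have hw' := hw
      rw [hww] at hw'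
      have hmem : ((x - 1) ∈ w) ↔ last = x - 1 := by
        rw [hww]; exact mem_pred_iff pre last x xs hw'
      have hlx : last < x := by
        rcases List.pairwise_append.mp hw' with ⟨_, hrest, _⟩
        exact (List.pairwise_cons.mp hrest).1 x (by simp)
      have htail : xs.filter (fun x => !(w.contains (x - 1))) = sts x xs :=
        ih (pre ++ [last]) x (by simp [hww])
      by_cases h : x = last + 1
      · have hc : w.contains (x - 1) = true := by simp [hmem]; omega
        rw [List.filter_cons]
        simp only [hc, Bool.not_true, Bool.false_eq_true, if_false]
        rw [htail, sts, if_pos h]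
      · have hc : w.contains (x - 1) = false := by simp [hmem]; omega
        rw [List.filter_cons]
        simp only [hc, Bool.not_false, if_true]
        rw [htail, sts, if_neg h]

lemma filter_ens (w : List Int) (hw : w.Pairwise (· < ·)) :
    ∀ (vs pre : List Int) (last : Int), w = pre ++ last :: vs →
    (last :: vs).filter (fun x => !(w.contains (x + 1))) = ens last vs := by
  intro vs
  induction vs with
  | nil =>
      intro pre last hww
      have hw' := hw
      rw [hww] at hw'
      have hmem : ((last + 1) ∈ w) ↔ ([] : List Int).head? = some (last + 1) := by
        rw [hww]; exact mem_succ_iff pre last [] hw'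
      have hnm : last + 1 ∉ w := by simp at hmem; exact hmem
      simp [hnm, ens]
  | cons x xs ih =>
      intro pre last hww
      have hw' := hw
      rw [hww] at hw'
      have hmem : ((last + 1) ∈ w) ↔ (x :: xs).head? = some (last + 1) := by
        rw [hww]; exact mem_succ_iff pre last (x :: xs) hw'
      simp only [List.head?_cons, Option.some.injEq] at hmem
      have htail : (x :: xs).filter (fun x => !(w.contains (x + 1))) = ens x xs :=
        ih (pre ++ [last]) x (by simp [hww])
      by_cases h : x = last + 1
      · have hc : w.contains (last + 1) = true := by simp [hmem]; omega
        rw [List.filter_cons]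
        simp only [hc, Bool.not_true, Bool.false_eq_true, if_false]
        rw [htail, ens, if_pos h]
      · have hc : w.contains (last + 1) = false := by simp [hmem]; omega
        rw [List.filter_cons]
        simp only [hc, Bool.not_false, if_true]
        rw [htail, ens, if_neg h]

lemma zip_runs : ∀ (vs : List Int) (start last : Int),
    ((start :: sts last vs).zip (ens last vs)).map (fun p => (p.1, p.2 + 1)) = runs start last vs := by
  intro vs
  induction vs with
  | nil => intro start last; simp [sts, ens, runs]
  | cons x xs ih =>
      intro start last
      by_cases h : x = last + 1
      · simp [sts, ens, runs, h, ih]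
      · simpa [sts, ens, runs, h, List.zip, List.map_zipWith] using ih x x

-- ===== VERDICT (by name: the statement is the Claim_ definition above) =====
theorem convert_from_list_to_intervals_spec : Claim_equal_convert_from_list_to_intervals := by
  intro loci _ hpre
  unfold Spec_convert_from_list_to_intervals
  unfold convert_from_list_to_intervals convert_from_list_to_intervals_alt
  simp only []
  set s : List Int := PySem.Set.ofList loci with hs
  set w : List Int := PySem.List.sorted s (fun x => x) false with hwdef
  have hsne : s ≠ [] := by
    cases loci with
    | nil => exact absurd rfl hpre
    | cons a l =>
        intro hnil
        have : a ∈ s := (PySem.Set.mem_ofList _ _).mpr (by simp)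
        rw [hnil] at this
        simp at this
  have hwne : w ≠ [] := by
    rw [hwdef]
    simpa [PySem.List.sorted_eq_nil_iff] using hsne
  obtain ⟨v, vs, hvvs⟩ := List.exists_cons_of_ne_nil hwne
  have hpair : w.Pairwise (· < ·) := by rw [hwdef, hs]; exact PySem.List.sorted_ofList_pairwise_lt loci
  obtain ⟨m, hm⟩ : ∃ m, PySem.List.max? w (fun x => x) = some m := by
    cases h : PySem.List.max? w (fun x => x) with
    | none => exact absurd ((PySem.List.max?_eq_none_iff _ _).mp h) hwne
    | some m => exact ⟨m, rfl⟩
  have hmx : ∀ y ∈ w, y ≤ m := PySem.List.max?_isMax hm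
  -- A side
  have hvalid : w ++ [(PySem.List.max? w (fun x => x)).getD 0 + 2] = v :: (vs ++ [m + 2]) := by
    rw [hm, hvvs]; rfl
  rw [hvalid]
  rw [fold_eq_gLoop_one (v :: (vs ++ [m + 2])) (by simp) _]
  have hstart : PySem.List.pyGetD (v :: (vs ++ [m + 2])) 0 0 = v := by
    simp [PySem.List.pyGetD_zero_cons]
  rw [hstart]
  simp only [List.getD_cons_zero, List.drop_one, List.tail_cons]
  have hpv : (v :: vs).Pairwise (· < ·) := by rw [← hvvs]; exact hpair
  have hA : (gLoop v (vs ++ [m + 2]) (v, [])).2 = runs v v vs := by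
    rw [gLoop_runs vs v v (m + 2) [] hpv
      (fun y hy => by have := hmx y (by rw [hvvs]; exact hy); omega)]
    simp
  rw [hA]
  -- B side
  have hperm : w.Perm s := PySem.List.sorted_perm s (fun x => x) false
  have hsortfilter : ∀ p : Int → Bool,
      PySem.List.sorted (s.filter p) (fun x => x) false = w.filter p := fun p =>
    PySem.List.sorted_eq_of_perm_of_pairwise_lt (s.filter p) (w.filter p)
      (fun x => x) (hperm.filter p) (hpair.filter p)
  rw [hsortfilter, hsortfilter]
  have hc1 : (fun x : Int => !(PySem.Set.contains s (x - 1))) =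
      (fun x : Int => !(w.contains (x - 1))) := by
    funext x
    have : (x - 1) ∈ s ↔ (x - 1) ∈ w := (hperm.mem_iff).symm
    simp [this]
  have hc2 : (fun x : Int => !(PySem.Set.contains s (x + 1))) =
      (fun x : Int => !(w.contains (x + 1))) := by
    funext x
    have : (x + 1) ∈ s ↔ (x + 1) ∈ w := (hperm.mem_iff).symm
    simp [this]
  rw [hc1, hc2]
  -- starts
  have hvmin : (v - 1) ∉ w := by
    intro hmem
    rw [hvvs] at hmem hpair
    rcases List.pairwise_cons.mp hpair with ⟨hall, _⟩
    rcases List.mem_cons.mp hmem with h1 | h1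
    · omega
    · have := hall _ h1; omega
  have hstarts : w.filter (fun x => !(w.contains (x - 1))) = v :: sts v vs := by
    rw [hvvs, List.filter_cons]
    have hpv' : (!(w.contains (v - 1))) = true := by simp [hvmin]
    rw [hvvs] at hpv'
    simp only [hpv', if_true]
    rw [← hvvs]
    exact congrArg (v :: ·) (filter_sts w hpair vs [] v (by simp [hvvs]))
  have hends : w.filter (fun x => !(w.contains (x + 1))) = ens v vs := by
    have h := filter_ens w hpair vs [] v (by simp [hvvs])
    rw [← hvvs] at h
    exact h
  rw [hstarts, hends, zip_runs vs v v]
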